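-- pv_equiv track=rewrite | github.com/idptools/goose | goose/backend/variant_generation_backend.py | seq_chunks_from_regions_list
-- ===== SOURCE A (Python) =====
-- def seq_chunks_from_regions_list(sequence, regions=[]):
--     '''
--     function that takes in specified regions and returns
--     a list of sequences
--
--     parameters
--     ----------
--     sequence : str
--         amino acid sequenc as a string
--
--     regions : list of lists
--         list of lists where sublists specify regions to break up
--         into chunks
--
--     returns
--     -------
--     complete_list : list
--         returns a list of lists that cover all reagions of the
--         input sequence as opposed to just the regions that
--         you want to change.
--     '''
--
--     # list to add additional lists to to close gaps
--     complete_list = []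
--
--     # make sure list is list of lists
--     if type(regions[0]) == int:
--         regions = [regions]
--
--
--     # iterate through lists to make sublists
--     for sublist in range(0, len(regions)):
--         curlist = regions[sublist]
--         if sublist == len(regions)-1:
--             if len(regions) == 1:
--                 if curlist[0] != 0:
--                     complete_list.append([0, curlist[0]])
--             complete_list.append(curlist)
--             if curlist[1] != len(sequence):
--                 complete_list.append([curlist[1], len(sequence)])
--         else:
--             if sublist == 0:
--                 if curlist[0] != 0:
--                     complete_list.append([0,curlist[0]])
--             nextlist = regions[sublist+1]
--             complete_list.append(curlist)
--             if curlist[1]!=nextlist[0]: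
--                 complete_list.append([curlist[1],nextlist[0]])
--
--     return complete_list
-- ===== SOURCE B (Python) =====
-- def seq_chunks_from_regions_list(sequence, regions=[]):
--     # make sure list is list of lists
--     if type(regions[0]) == int:
--         regions = [regions]
--
--     complete_list = []
--     prev = 0
--     for region in regions:
--         if region[0] != prev:
--             complete_list.append([prev, region[0]])
--         complete_list.append(region)
--         prev = region[1]
--     if prev != len(sequence):
--         complete_list.append([prev, len(sequence)])
--     return complete_list
-- ===== Notes on version B (the rewrite author's own statement) =====
-- stated objective: simpler
-- what changed: Replaced the index-based loop with lookahead to regions[sublist+1] and hard-coded first/last special cases by a single cursor pass that keeps the end of the previous region and emits each gap before the region it precedes.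
import Mathlib
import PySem

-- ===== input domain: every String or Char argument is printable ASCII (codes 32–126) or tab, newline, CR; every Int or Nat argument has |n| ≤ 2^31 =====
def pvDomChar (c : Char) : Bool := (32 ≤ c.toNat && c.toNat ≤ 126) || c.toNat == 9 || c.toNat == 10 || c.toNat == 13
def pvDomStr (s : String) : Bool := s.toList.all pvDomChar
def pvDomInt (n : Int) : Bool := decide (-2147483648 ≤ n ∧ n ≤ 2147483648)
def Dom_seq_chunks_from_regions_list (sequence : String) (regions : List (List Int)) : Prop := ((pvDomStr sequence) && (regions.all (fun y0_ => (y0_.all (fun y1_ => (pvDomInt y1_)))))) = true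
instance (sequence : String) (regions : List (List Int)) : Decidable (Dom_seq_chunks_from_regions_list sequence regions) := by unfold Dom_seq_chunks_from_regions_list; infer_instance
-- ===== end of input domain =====

-- B replaces A's index-based loop (with lookahead to regions[sublist+1] and special first/last
-- cases) by a single cursor pass keeping the previous region's end: simpler, same O(n) cost.
-- Under the type convention regions : List (List Int), Python's `type(regions[0]) == int`
-- guard is statically false (it only fires for a flat int list); regions[0] on an empty
-- regions list raises IndexError, which Pre_ excludes.

-- ===== PORT A =====
-- loop body of A's `for sublist in range(0, len(regions))`; acc = complete_list
def stepA (L n : Int) (regions : List (List Int)) (acc : List (List Int)) (sublist : Nat) : List (List Int) :=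
  let curlist := regions.getD sublist []
  if (sublist : Int) = n - 1 then
    let acc := if n = 1 then (if curlist.getD 0 0 ≠ 0 then acc ++ [[0, curlist.getD 0 0]] else acc) else acc
    let acc := acc ++ [curlist]
    if curlist.getD 1 0 ≠ L then acc ++ [[curlist.getD 1 0, L]] else acc
  else
    let acc := if sublist = 0 then (if curlist.getD 0 0 ≠ 0 then acc ++ [[0, curlist.getD 0 0]] else acc) else acc
    let nextlist := regions.getD (sublist + 1) []
    let acc := acc ++ [curlist]
    if curlist.getD 1 0 ≠ nextlist.getD 0 0 then acc ++ [[curlist.getD 1 0, nextlist.getD 0 0]] else acc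

def seq_chunks_from_regions_list (sequence : String) (regions : List (List Int)) : List (List Int) :=
  (List.range regions.length).foldl
    (stepA (PySem.Str.len sequence) (regions.length : Int) regions) []

-- ===== PORT B =====
-- loop body of B's `for region in regions`; state = (complete_list, prev)
def stepB (st : List (List Int) × Int) (region : List Int) : List (List Int) × Int :=
  let acc := if region.getD 0 0 ≠ st.2 then st.1 ++ [[st.2, region.getD 0 0]] else st.1
  (acc ++ [region], region.getD 1 0)

def seq_chunks_from_regions_list_alt (sequence : String) (regions : List (List Int)) : List (List Int) :=
  let s := regions.foldl stepB ([], 0)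
  if s.2 ≠ PySem.Str.len sequence then s.1 ++ [[s.2, PySem.Str.len sequence]] else s.1

-- ===== PRECONDITION & SPEC =====
-- Pre_ excludes exactly the inputs on which the Python A raises IndexError:
-- empty regions (regions[0]) and sublists shorter than 2 (curlist[0]/curlist[1]).
def Pre_seq_chunks_from_regions_list (sequence : String) (regions : List (List Int)) : Prop :=
  regions ≠ [] ∧ ∀ r ∈ regions, 2 ≤ r.length
instance (sequence : String) (regions : List (List Int)) : Decidable (Pre_seq_chunks_from_regions_list sequence regions) := by unfold Pre_seq_chunks_from_regions_list; infer_instance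

def pvWitness_seq_chunks_from_regions_list : String × List (List Int) := ("ABCD", [[1, 2], [2, 3]])

def Spec_seq_chunks_from_regions_list (sequence : String) (regions : List (List Int)) (out : List (List Int)) : Prop := out = seq_chunks_from_regions_list_alt sequence regions
instance (sequence : String) (regions : List (List Int)) (out : List (List Int)) : Decidable (Spec_seq_chunks_from_regions_list sequence regions out) := by unfold Spec_seq_chunks_from_regions_list; infer_instance

-- ===== CLAIM (what is proved, stated in full; the proofs are below) =====
def Claim_equal_seq_chunks_from_regions_list : Prop := ∀ (sequence : String) (regions : List (List Int)), Dom_seq_chunks_from_regions_list sequence regions → Pre_seq_chunks_from_regions_list sequence regions → Spec_seq_chunks_from_regions_list sequence regions (seq_chunks_from_regions_list sequence regions)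

-- ===== LEMMAS AND PROOFS =====

-- closed recursion computing B's result: prev = end of the previous region (0 at the start)
def chainB (L : Int) : Int → List (List Int) → List (List Int)
  | prev, [] => if prev ≠ L then [[prev, L]] else []
  | prev, r :: rest =>
      (if r.getD 0 0 ≠ prev then [[prev, r.getD 0 0]] else []) ++ [r] ++ chainB L (r.getD 1 0) rest

-- closed recursion computing what A's loop appends from index i on (rs = regions.drop i)
def tailA (L : Int) : Nat → List (List Int) → List (List Int)
  | _, [] => []
  | i, [r] =>
      (if i = 0 then (if r.getD 0 0 ≠ 0 then [[0, r.getD 0 0]] else []) else []) ++ [r] ++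
      (if r.getD 1 0 ≠ L then [[r.getD 1 0, L]] else [])
  | i, r :: r' :: rest =>
      (if i = 0 then (if r.getD 0 0 ≠ 0 then [[0, r.getD 0 0]] else []) else []) ++ [r] ++
      (if r.getD 1 0 ≠ r'.getD 0 0 then [[r.getD 1 0, r'.getD 0 0]] else []) ++
      tailA L (i + 1) (r' :: rest)

lemma chainB_foldl (L : Int) : ∀ (rs : List (List Int)) (acc : List (List Int)) (prev : Int),
    (if (rs.foldl stepB (acc, prev)).2 ≠ L then (rs.foldl stepB (acc, prev)).1 ++ [[(rs.foldl stepB (acc, prev)).2, L]] else (rs.foldl stepB (acc, prev)).1)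
      = acc ++ chainB L prev rs := by
  intro rs
  induction rs with
  | nil => intro acc prev; simp only [List.foldl_nil, chainB]; split_ifs <;> simp
  | cons r rest ih =>
    intro acc prev
    simp only [List.foldl_cons, stepB, chainB]
    rw [ih]
    split_ifs with h <;> simp [List.append_assoc]

lemma tailA_pos (L : Int) : ∀ (rs : List (List Int)) (i j : Nat), i ≠ 0 → j ≠ 0 →
    tailA L i rs = tailA L j rs := by
  intro rs
  induction rs with
  | nil => intro i j _ _; rfl
  | cons r rest ih =>
    intro i j hi hj
    cases rest with
    | nil => simp [tailA, hi, hj]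
    | cons r' rest' =>
      simp only [tailA, hi, hj, reduceIte]
      rw [ih (i + 1) (j + 1) (by omega) (by omega)]

lemma tailA_chain (L : Int) : ∀ (rest : List (List Int)) (r : List Int),
    tailA L 1 (r :: rest) = [r] ++ chainB L (r.getD 1 0) rest := by
  intro rest
  induction rest with
  | nil => intro r; simp [tailA, chainB]
  | cons r' rest' ih =>
    intro r
    simp only [tailA, chainB, one_ne_zero, reduceIte]
    rw [tailA_pos L (r' :: rest') 2 1 (by omega) (by omega), ih r']
    by_cases h : r.getD 1 0 = r'.getD 0 0
    · rw [if_neg (not_not_intro h), if_neg (not_not_intro h.symm)]; simp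
    · rw [if_pos h, if_pos (Ne.symm h)]; simp [List.append_assoc]

lemma tailA_zero (L : Int) : ∀ (rest : List (List Int)) (r : List Int),
    tailA L 0 (r :: rest) = (if r.getD 0 0 ≠ 0 then [[0, r.getD 0 0]] else []) ++ tailA L 1 (r :: rest) := by
  intro rest r
  cases rest with
  | nil => simp [tailA]
  | cons r' rest' =>
    simp only [tailA, reduceIte, one_ne_zero]
    rw [tailA_pos L (r' :: rest') 1 2 (by omega) (by omega)]
    simp [List.append_assoc]

lemma loopA (L : Int) (regions : List (List Int)) :
    ∀ (rs : List (List Int)) (i : Nat) (acc : List (List Int)), regions.drop i = rs →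
      (List.range' i rs.length).foldl (stepA L (regions.length : Int) regions) acc
        = acc ++ tailA L i rs := by
  intro rs
  induction rs with
  | nil => intro i acc _; simp [tailA]
  | cons r rest ih =>
    intro i acc h
    have hilt : i < regions.length := by
      by_contra hge
      rw [List.drop_eq_nil_of_le (by omega)] at h
      simp at h
    have hlen : (regions.drop i).length = regions.length - i := List.length_drop ..
    rw [h] at hlen
    have hri : regions[i]? = some r := by
      have h0 : (regions.drop i)[0]? = regions[i + 0]? := List.getElem?_drop
      rw [h] at h0; simpa using h0.symm
    have hgetD : regions.getD i [] = r := by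
      simp [List.getD_eq_getElem?_getD, hri]
    have hdrop1 : regions.drop (i + 1) = rest := by
      have h1 : List.drop 1 (List.drop i regions) = List.drop (i + 1) regions := List.drop_drop
      rw [h] at h1; simpa using h1.symm
    simp only [List.length_cons, List.range'_succ, List.foldl_cons]
    cases rest with
    | nil =>
      have hlast : i = regions.length - 1 := by simp at hlen; omega
      simp only [List.length_nil, List.range', List.foldl_nil]
      simp only [stepA, hgetD]
      have hcond : ((i : Int) = (regions.length : Int) - 1) := by omega
      rw [if_pos hcond]
      have h1 : ((regions.length : Int) = 1) ↔ (i = 0) := by omega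
      by_cases hi : i = 0
      · simp only [tailA, hi, reduceIte, h1.mpr hi]
        split_ifs <;> simp [List.append_assoc]
      · have : ¬ ((regions.length : Int) = 1) := fun hc => hi (h1.mp hc)
        simp only [tailA, hi, reduceIte, this]
        split_ifs <;> simp [List.append_assoc]
    | cons r' rest' =>
      have hri' : regions[i+1]? = some r' := by
        have h0 : (regions.drop i)[1]? = regions[i + 1]? := List.getElem?_drop
        rw [h] at h0; simpa using h0.symm
      have hgetD' : regions.getD (i + 1) [] = r' := by
        simp [List.getD_eq_getElem?_getD, hri']
      have hcond : ¬ ((i : Int) = (regions.length : Int) - 1) := by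
        simp at hlen; omega
      rw [ih (i + 1) _ hdrop1]
      simp only [stepA, hgetD, hgetD', if_neg hcond]
      by_cases hi : i = 0
      · simp only [tailA, hi, reduceIte]
        rw [tailA_pos L (r' :: rest') 1 (0 + 1) (by omega) (by omega)]
        split_ifs <;> simp [List.append_assoc]
      · simp only [tailA, hi, reduceIte]
        split_ifs <;> simp [List.append_assoc]

-- ===== VERDICT (by name: the statement is the Claim_ definition above) =====
theorem seq_chunks_from_regions_list_spec : Claim_equal_seq_chunks_from_regions_list := by
  intro sequence regions _ hpre
  unfold Spec_seq_chunks_from_regions_list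
  obtain ⟨hne, -⟩ := hpre
  obtain ⟨r, rest, rfl⟩ := List.exists_cons_of_ne_nil hne
  set L := PySem.Str.len sequence with hL
  have hA : seq_chunks_from_regions_list sequence (r :: rest) = tailA L 0 (r :: rest) := by
    unfold seq_chunks_from_regions_list
    rw [List.range_eq_range']
    have := loopA L (r :: rest) (r :: rest) 0 [] (by simp)
    simpa using this
  have hB : seq_chunks_from_regions_list_alt sequence (r :: rest) = chainB L 0 (r :: rest) := by
    unfold seq_chunks_from_regions_list_alt
    have := chainB_foldl L (r :: rest) [] 0
    simpa using this
  rw [hA, hB, tailA_zero, tailA_chain]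
  simp [chainB]
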